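-- pv_equiv track=rewrite | github.com/oldnordic/LTMC | ltms/tools/context/relationships.py | _detect_simple_cycles
-- ===== SOURCE A (Python) =====
-- from typing import Dict, Any, List, Optional, Set, Tuple
--
-- def _detect_simple_cycles(connections: List[Dict[str, Any]]) -> List[List[str]]:
--     """
--     Detect simple cycles in relationship graph.
--
--     Args:
--         connections: List of connection dictionaries
--
--     Returns:
--         List[List[str]]: List of detected cycles
--     """
--     # Build adjacency list
--     graph = {}
--     for conn in connections:
--         source = conn["source"]
--         target = conn["target"]
--
--         if source not in graph:
--             graph[source] = []
--         graph[source].append(target)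
--
--     # Find cycles using DFS (limited to prevent infinite loops)
--     cycles = []
--     visited = set()
--     rec_stack = set()
--
--     def dfs(node, path):
--         if len(path) > 10:  # Prevent deep recursion
--             return
--
--         if node in rec_stack:
--             # Found cycle
--             cycle_start = path.index(node)
--             cycle = path[cycle_start:] + [node]
--             if len(cycle) <= 6:  # Only short cycles
--                 cycles.append(cycle)
--             return
--
--         if node in visited:
--             return
--
--         visited.add(node)
--         rec_stack.add(node)
--
--         for neighbor in graph.get(node, []):
--             dfs(neighbor, path + [node])
--
--         rec_stack.remove(node)
--
--     # Check each node as potential cycle start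
--     for node in list(graph.keys())[:20]:  # Limit to prevent excessive computation
--         if node not in visited:
--             dfs(node, [])
--
--     return cycles[:5]  # Return max 5 cycles
-- ===== SOURCE B (Python) =====
-- def _detect_simple_cycles(connections):
--     """Iterative re-implementation: explicit stack of visit/leave frames instead of recursion."""
--     graph = {}
--     for conn in connections:
--         source = conn["source"]
--         target = conn["target"]
--         if source not in graph:
--             graph[source] = []
--         graph[source].append(target)
--
--     cycles = []
--     visited = set()
--     rec_stack = set()
--
--     for start in list(graph.keys())[:20]:
--         if start in visited:
--             continue
--         stack = [("visit", start, [])]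
--         while stack:
--             frame = stack.pop()
--             if frame[0] == "leave":
--                 rec_stack.remove(frame[1])
--                 continue
--             _, node, path = frame
--             if len(path) > 10:
--                 continue
--             if node in rec_stack:
--                 i = path.index(node)
--                 cycle = path[i:] + [node]
--                 if len(cycle) <= 6:
--                     cycles.append(cycle)
--                 continue
--             if node in visited:
--                 continue
--             visited.add(node)
--             rec_stack.add(node)
--             stack.append(("leave", node))
--             new_path = path + [node]
--             for nb in reversed(graph.get(node, [])):
--                 stack.append(("visit", nb, new_path))
--     return cycles[:5]
-- ===== Notes on version B (the rewrite author's own statement) =====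
-- stated objective: alternative
-- what changed: The recursive nested dfs closure is replaced by an iterative loop over an explicit stack of visit/leave frames (leave frames defer the rec_stack removal until all children are processed), preserving the exact DFS order, cycle filter and limits.
import Mathlib
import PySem

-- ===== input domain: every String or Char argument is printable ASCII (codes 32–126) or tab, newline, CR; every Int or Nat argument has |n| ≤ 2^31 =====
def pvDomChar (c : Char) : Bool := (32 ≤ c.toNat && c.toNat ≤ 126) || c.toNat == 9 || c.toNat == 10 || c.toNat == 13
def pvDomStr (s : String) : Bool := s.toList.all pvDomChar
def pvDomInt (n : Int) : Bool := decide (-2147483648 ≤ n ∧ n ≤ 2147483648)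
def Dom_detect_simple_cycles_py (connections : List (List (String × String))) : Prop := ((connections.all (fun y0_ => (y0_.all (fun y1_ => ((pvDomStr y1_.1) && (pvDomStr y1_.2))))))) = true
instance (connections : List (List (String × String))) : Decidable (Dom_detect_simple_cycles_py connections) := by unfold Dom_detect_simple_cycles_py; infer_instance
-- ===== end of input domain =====

-- B replaces the recursive dfs by an explicit stack of visit/leave frames (same DFS order, filters and limits); equal return values, no side effects involved.

-- ===== PORT A =====
-- state: (visited, rec_stack, cycles)
-- builds the adjacency dict: "if source not in graph: graph[source] = []" then "graph[source].append(target)";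
-- a conn missing the "source"/"target" key (KeyError in Python, excluded by Pre_) is skipped.
def pvBuildGraphA (connections : List (List (String × String))) : PySem.Dict String (List String) :=
  connections.foldl (fun g conn =>
    match (PySem.Dict.mk conn).get? "source", (PySem.Dict.mk conn).get? "target" with
    | some s, some t =>
        let g1 := if g.contains s then g else g.insert s []
        g1.insert s (g1.getD s [] ++ [t])
    | _, _ => g) PySem.Dict.empty

mutual
-- the recursive dfs(node, path); `path.drop i` is Python's path[i:] for the nonnegative i = path.index(node);
-- index? = none and remove? = none are unreachable (rec_stack elements lie on path) and keep the state unchanged.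
def pvDfsA (g : PySem.Dict String (List String)) (node : String) (path : List String)
    (st : PySem.Set String × PySem.Set String × List (List String)) :
    PySem.Set String × PySem.Set String × List (List String) :=
  if _h : path.length > 10 then st
  else if PySem.Set.contains st.2.1 node then
    (match PySem.List.index? path node with
     | some i =>
         let cycle := path.drop i ++ [node]
         if cycle.length ≤ 6 then (st.1, st.2.1, st.2.2 ++ [cycle]) else st
     | none => st)
  else if PySem.Set.contains st.1 node then st
  else
    let st1 := (PySem.Set.add st.1 node, PySem.Set.add st.2.1 node, st.2.2)
    let st2 := pvDfsListA g (g.getD node []) (path ++ [node]) st1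
    (st2.1, (PySem.Set.remove? st2.2.1 node).getD st2.2.1, st2.2.2)
termination_by (11 - path.length, 0)

-- "for neighbor in graph.get(node, []): dfs(neighbor, path + [node])"
def pvDfsListA (g : PySem.Dict String (List String)) (ns : List String) (path' : List String)
    (st : PySem.Set String × PySem.Set String × List (List String)) :
    PySem.Set String × PySem.Set String × List (List String) :=
  match ns with
  | [] => st
  | nb :: rest => pvDfsListA g rest path' (pvDfsA g nb path' st)
termination_by (11 - path'.length, ns.length + 1)
end

def detect_simple_cycles_py (connections : List (List (String × String))) : List (List String) :=
  let g := pvBuildGraphA connections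
  let final := (g.keys.take 20).foldl
    (fun st node => if PySem.Set.contains st.1 node then st else pvDfsA g node [] st)
    (PySem.Set.empty, PySem.Set.empty, ([] : List (List String)))
  final.2.2.take 5

-- ===== PORT B =====
def pvBuildGraphB (connections : List (List (String × String))) : PySem.Dict String (List String) :=
  connections.foldl (fun g conn =>
    match (PySem.Dict.mk conn).get? "source", (PySem.Dict.mk conn).get? "target" with
    | some s, some t =>
        let g1 := if g.contains s then g else g.insert s []
        g1.insert s (g1.getD s [] ++ [t])
    | _, _ => g) PySem.Dict.empty

-- a stack entry of Source B: ("visit", node, path) or ("leave", node)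
inductive PvFrame where
  | visit (node : String) (path : List String)
  | leave (node : String)

-- fuel bound used to totalise Source B's `while stack:` loop (the loop itself terminates long before)
def pvFuelK (m : Nat) : Nat → Nat
  | 0 => 1
  | r + 1 => 2 + m * pvFuelK m r

-- the `while stack: frame = stack.pop(); ...` loop; head of the list = top of the stack, so pushing
-- "leave" then reversed(neighbors) in Python is `neighbors.map visit ++ leave :: rest` here.
def pvMachineB (g : PySem.Dict String (List String)) (fuel : Nat) (stack : List PvFrame)
    (st : PySem.Set String × PySem.Set String × List (List String)) :
    PySem.Set String × PySem.Set String × List (List String) :=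
  match stack with
  | [] => st
  | frame :: rest =>
    match fuel with
    | 0 => st
    | f + 1 =>
      match frame with
      | .leave node => pvMachineB g f rest (st.1, (PySem.Set.remove? st.2.1 node).getD st.2.1, st.2.2)
      | .visit node path =>
        if path.length > 10 then pvMachineB g f rest st
        else if PySem.Set.contains st.2.1 node then
          pvMachineB g f rest
            (match PySem.List.index? path node with
             | some i =>
                 let cycle := path.drop i ++ [node]
                 if cycle.length ≤ 6 then (st.1, st.2.1, st.2.2 ++ [cycle]) else st
             | none => st)
        else if PySem.Set.contains st.1 node then pvMachineB g f rest st
        else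
          pvMachineB g f
            ((g.getD node []).map (fun nb => PvFrame.visit nb (path ++ [node])) ++ (PvFrame.leave node :: rest))
            (PySem.Set.add st.1 node, PySem.Set.add st.2.1 node, st.2.2)

def detect_simple_cycles_py_alt (connections : List (List (String × String))) : List (List String) :=
  let g := pvBuildGraphB connections
  let fuel := pvFuelK connections.length 11
  let final := (g.keys.take 20).foldl
    (fun st node => if PySem.Set.contains st.1 node then st
                    else pvMachineB g fuel [PvFrame.visit node []] st)
    (PySem.Set.empty, PySem.Set.empty, ([] : List (List String)))
  final.2.2.take 5

-- ===== PRECONDITION & SPEC =====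
-- Pre_ excludes exactly the connections on which Python A raises KeyError: a conn dict missing "source" or "target".
def Pre_detect_simple_cycles_py (connections : List (List (String × String))) : Prop :=
  ∀ conn ∈ connections, ((PySem.Dict.mk conn).get? "source").isSome = true ∧ ((PySem.Dict.mk conn).get? "target").isSome = true
instance (connections : List (List (String × String))) : Decidable (Pre_detect_simple_cycles_py connections) := by unfold Pre_detect_simple_cycles_py; infer_instance

def pvWitness_detect_simple_cycles_py : (List (List (String × String))) :=
  [[("source", "a"), ("target", "b")], [("source", "b"), ("target", "a")]]

def Spec_detect_simple_cycles_py (connections : List (List (String × String))) (out : List (List String)) : Prop := out = detect_simple_cycles_py_alt connections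
instance (connections : List (List (String × String))) (out : List (List String)) : Decidable (Spec_detect_simple_cycles_py connections out) := by unfold Spec_detect_simple_cycles_py; infer_instance

-- ===== CLAIM (what is proved, stated in full; the proofs are below) =====
def Claim_equal_detect_simple_cycles_py : Prop := ∀ (connections : List (List (String × String))), Dom_detect_simple_cycles_py connections → Pre_detect_simple_cycles_py connections → Spec_detect_simple_cycles_py connections (detect_simple_cycles_py connections)

-- ===== LEMMAS AND PROOFS =====

theorem pvFuelK_pos (m r : Nat) : 1 ≤ pvFuelK m r := by
  cases r <;> simp [pvFuelK] <;> omega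

-- every adjacency list in the built graph has length ≤ number of connections
def pvStepG (g : PySem.Dict String (List String)) (conn : List (String × String)) :
    PySem.Dict String (List String) :=
  match (PySem.Dict.mk conn).get? "source", (PySem.Dict.mk conn).get? "target" with
  | some s, some t =>
      let g1 := if g.contains s then g else g.insert s []
      g1.insert s (g1.getD s [] ++ [t])
  | _, _ => g

theorem pvBuild_eq (conns : List (List (String × String))) :
    pvBuildGraphA conns = conns.foldl pvStepG PySem.Dict.empty := rfl

theorem pvStep_bound (g : PySem.Dict String (List String)) (conn : List (String × String))
    (k : String) : ((pvStepG g conn).getD k []).length ≤ (g.getD k []).length + 1 := by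
  unfold pvStepG
  rcases (PySem.Dict.mk conn).get? "source" with _ | s <;>
    rcases (PySem.Dict.mk conn).get? "target" with _ | t <;> simp only
  · omega
  · omega
  · omega
  · by_cases hc : g.contains s <;>
      simp only [hc, if_true, Bool.false_eq_true, if_false] <;>
      by_cases hk : k = s <;>
      simp [PySem.Dict.getD_insert, hk]

theorem pvDeg_aux (conns : List (List (String × String))) :
    ∀ (g : PySem.Dict String (List String)) (k : String),
      ((conns.foldl pvStepG g).getD k []).length ≤ (g.getD k []).length + conns.length := by
  induction conns with
  | nil => intro g k; simp
  | cons conn rest ih =>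
    intro g k
    rw [List.foldl_cons, List.length_cons]
    have h1 := ih (pvStepG g conn) k
    have h2 := pvStep_bound g conn k
    omega

theorem pvDeg_le (connections : List (List (String × String))) (k : String) :
    ((pvBuildGraphA connections).getD k []).length ≤ connections.length := by
  rw [pvBuild_eq]
  simpa using pvDeg_aux connections PySem.Dict.empty k

-- list form of the simulation: a block of visit frames for ns behaves like the dfs loop over ns
theorem pvSimList (g : PySem.Dict String (List String)) (m : Nat) (path' : List String)
    (H1 : ∀ node st rest, ∃ c, c ≤ pvFuelK m (11 - path'.length) ∧
        ∀ f, pvMachineB g (f + c) (PvFrame.visit node path' :: rest) st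
              = pvMachineB g f rest (pvDfsA g node path' st)) :
    ∀ ns st rest, ∃ c, c ≤ ns.length * pvFuelK m (11 - path'.length) ∧
      ∀ f, pvMachineB g (f + c) (ns.map (fun nb => PvFrame.visit nb path') ++ rest) st
            = pvMachineB g f rest (pvDfsListA g ns path' st) := by
  intro ns
  induction ns with
  | nil =>
    intro st rest
    exact ⟨0, by simp, fun f => by rw [pvDfsListA]; simp⟩
  | cons nb restNs ih =>
    intro st rest
    obtain ⟨c1, hc1, h1⟩ := H1 nb st (restNs.map (fun nb => PvFrame.visit nb path') ++ rest)
    obtain ⟨c2, hc2, h2⟩ := ih (pvDfsA g nb path' st) rest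
    refine ⟨c1 + c2, ?_, ?_⟩
    · have : (restNs.length + 1) * pvFuelK m (11 - path'.length)
          = pvFuelK m (11 - path'.length) + restNs.length * pvFuelK m (11 - path'.length) := by ring
      simp only [List.length_cons, this]
      omega
    · intro f
      have e : f + (c1 + c2) = (f + c2) + c1 := by omega
      rw [e]
      simp only [List.map_cons, List.cons_append]
      rw [h1 (f + c2), h2 f, pvDfsListA]

-- main simulation lemma: one visit frame behaves like one dfs call, consuming ≤ pvFuelK m (11 - |path|) fuel
theorem pvSim (g : PySem.Dict String (List String)) (m : Nat)
    (hdeg : ∀ n, ((g.getD n []).length ≤ m)) :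
    ∀ r node path st rest, 11 - path.length ≤ r →
      ∃ c, c ≤ pvFuelK m (11 - path.length) ∧
        ∀ f, pvMachineB g (f + c) (PvFrame.visit node path :: rest) st
              = pvMachineB g f rest (pvDfsA g node path st) := by
  intro r
  induction r with
  | zero =>
    intro node path st rest hr
    have hlen : path.length > 10 := by omega
    refine ⟨1, pvFuelK_pos m _, fun f => ?_⟩
    rw [pvDfsA]
    simp [pvMachineB, hlen]
  | succ r ih =>
    intro node path st rest hr
    by_cases hlen : path.length > 10
    · refine ⟨1, pvFuelK_pos m _, fun f => ?_⟩
      rw [pvDfsA]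
      simp [pvMachineB, hlen]
    · rw [Nat.not_lt] at hlen
      by_cases hrec : node ∈ st.2.1
      · refine ⟨1, pvFuelK_pos m _, fun f => ?_⟩
        rw [pvDfsA]
        simp [pvMachineB, hrec, Nat.not_lt.mpr hlen]
      · by_cases hvis : node ∈ st.1
        · refine ⟨1, pvFuelK_pos m _, fun f => ?_⟩
          rw [pvDfsA]
          simp [pvMachineB, hrec, hvis, Nat.not_lt.mpr hlen]
        · -- expand: mark the node, run the neighbour block, then the leave frame
          have H1 : ∀ node' st' rest', ∃ c, c ≤ pvFuelK m (11 - (path ++ [node]).length) ∧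
              ∀ f, pvMachineB g (f + c) (PvFrame.visit node' (path ++ [node]) :: rest') st'
                    = pvMachineB g f rest' (pvDfsA g node' (path ++ [node]) st') := by
            intro node' st' rest'
            exact ih node' (path ++ [node]) st' rest' (by simp; omega)
          obtain ⟨cns, hcns, hns⟩ := pvSimList g m (path ++ [node]) H1 (g.getD node [])
            (PySem.Set.add st.1 node, PySem.Set.add st.2.1 node, st.2.2)
            (PvFrame.leave node :: rest)
          refine ⟨cns + 2, ?_, ?_⟩
          · have hK : pvFuelK m (11 - path.length) = 2 + m * pvFuelK m (11 - (path ++ [node]).length) := by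
              have e1 : 11 - path.length = (11 - (path ++ [node]).length) + 1 := by
                simp only [List.length_append, List.length_cons, List.length_nil]
                omega
              rw [e1, pvFuelK]
            have hdegK : (g.getD node []).length * pvFuelK m (11 - (path ++ [node]).length)
                ≤ m * pvFuelK m (11 - (path ++ [node]).length) :=
              Nat.mul_le_mul_right _ (hdeg node)
            omega
          · intro f
            have e : f + (cns + 2) = ((f + 1) + cns) + 1 := by omega
            rw [e]
            simp only [pvMachineB]
            simp only [Nat.not_lt.mpr hlen, if_false]
            rw [hns (f + 1)]
            rw [pvDfsA]
            simp [Nat.not_lt.mpr hlen, hrec, hvis, pvMachineB]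

theorem pvRun (g : PySem.Dict String (List String)) (m : Nat)
    (hdeg : ∀ n, ((g.getD n []).length ≤ m)) (node : String) (st) :
    pvMachineB g (pvFuelK m 11) [PvFrame.visit node []] st = pvDfsA g node [] st := by
  obtain ⟨c, hc, h⟩ := pvSim g m hdeg 11 node [] st [] (by simp)
  have hle : c ≤ pvFuelK m 11 := by simpa using hc
  have := h (pvFuelK m 11 - c)
  rw [Nat.sub_add_cancel hle] at this
  simpa [pvMachineB] using this

-- ===== VERDICT (by name: the statement is the Claim_ definition above) =====
theorem detect_simple_cycles_py_spec : Claim_equal_detect_simple_cycles_py := by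
  intro connections _ _
  show detect_simple_cycles_py connections = detect_simple_cycles_py_alt connections
  simp only [detect_simple_cycles_py, detect_simple_cycles_py_alt]
  have hb : pvBuildGraphB connections = pvBuildGraphA connections := rfl
  rw [hb]
  have hf : (fun (st : PySem.Set String × PySem.Set String × List (List String)) (node : String) =>
        if PySem.Set.contains st.1 node then st
        else pvMachineB (pvBuildGraphA connections) (pvFuelK connections.length 11)
          [PvFrame.visit node []] st)
      = (fun st node => if PySem.Set.contains st.1 node then st
        else pvDfsA (pvBuildGraphA connections) node [] st) := by
    funext st node
    by_cases h : node ∈ st.1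
    · simp [h]
    · simp [h]
      exact pvRun (pvBuildGraphA connections) connections.length
        (fun n => pvDeg_le connections n) node st
  rw [hf]
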